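-- pv_equiv track=rewrite | github.com/sbeechani/Project_Plagiarism | Bag_of_words.py | removeunwanted
-- ===== SOURCE A (Python) =====
-- def removeunwanted(x,wordlist):
--     y=""
--     x.lower()
--     for i in range (len(x)):
--         if x[i] in 'abcdefghijklmnopqrstuvwxyz0123456789_':
--             y+=x[i]
--         if y not in wordlist:
--             if len(y)!=0:
--                 wordlist.append(y)
--     return (y,wordlist)
-- ===== SOURCE B (Python) =====
-- def removeunwanted(x, wordlist):
--     x.lower()  # result discarded, as in the original; raises AttributeError on non-string input
--     allowed = set('abcdefghijklmnopqrstuvwxyz0123456789_')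
--     y = "".join(c for c in x if c in allowed)
--     for k in range(1, len(y) + 1):
--         p = y[:k]
--         if p not in wordlist:
--             wordlist.append(p)
--     return (y, wordlist)
-- ===== Notes on version B (the rewrite author's own statement) =====
-- stated objective: simpler
-- what changed: B builds the filtered string once with a join over a set-membership filter and then appends each nonempty prefix of it that is not already present, instead of A's single loop that re-checks and conditionally appends the growing accumulator on every character (including characters that change nothing).
import Mathlib
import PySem

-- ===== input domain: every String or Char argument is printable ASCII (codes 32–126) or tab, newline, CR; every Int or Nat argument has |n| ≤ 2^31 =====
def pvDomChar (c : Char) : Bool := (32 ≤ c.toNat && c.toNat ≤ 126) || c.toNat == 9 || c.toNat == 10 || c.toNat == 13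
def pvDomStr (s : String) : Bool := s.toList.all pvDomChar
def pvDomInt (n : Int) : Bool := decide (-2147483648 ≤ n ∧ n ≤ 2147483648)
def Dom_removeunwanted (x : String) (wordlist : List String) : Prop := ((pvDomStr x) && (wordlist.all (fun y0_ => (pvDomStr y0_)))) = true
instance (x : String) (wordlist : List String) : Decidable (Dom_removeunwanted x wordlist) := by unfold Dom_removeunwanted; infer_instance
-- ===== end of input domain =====

-- B builds the filtered string once, then appends its nonempty prefixes not already present;
-- simpler decomposition than A's per-character re-check of the growing accumulator.
-- Equivalence is about the RETURN value; both Pythons also mutate wordlist in place identically.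

-- ===== PORT A =====
-- the allowed-character string 'abcdefghijklmnopqrstuvwxyz0123456789_'
def pvAllowed : List Char := "abcdefghijklmnopqrstuvwxyz0123456789_".toList

-- the for-loop of A: i ranges over the characters of x in order (x[i] for i in range(len(x)));
-- state is (y, wordlist); branch order as in the Python.
def removeunwantedLoopA : List Char → String → List String → String × List String
  | [], y, wl => (y, wl)
  | c :: cs, y, wl =>
    let y' := if pvAllowed.contains c then y.push c else y
    let wl' := if ¬ wl.contains y' then (if y'.length ≠ 0 then wl ++ [y'] else wl) else wl
    removeunwantedLoopA cs y' wl'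

def removeunwanted (x : String) (wordlist : List String) : String × List String :=
  -- x.lower() is computed and discarded in the Python; a no-op on the return value
  removeunwantedLoopA x.toList "" wordlist

-- ===== PORT B =====
def removeunwanted_alt (x : String) (wordlist : List String) : String × List String :=
  let y := x.toList.filter (fun c => pvAllowed.contains c)
  -- for k in range(1, len(y)+1): p = y[:k]; append p if absent (k = j+1 for j over range(len(y)))
  let wl := (List.range y.length).foldl
    (fun wl j =>
      let p := String.ofList (y.take (j + 1))
      if ¬ wl.contains p then wl ++ [p] else wl)
    wordlist
  (String.ofList y, wl)

-- ===== PRECONDITION & SPEC =====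
def Spec_removeunwanted (x : String) (wordlist : List String) (out : String × List String) : Prop := out = removeunwanted_alt x wordlist
instance (x : String) (wordlist : List String) (out : String × List String) : Decidable (Spec_removeunwanted x wordlist out) := by unfold Spec_removeunwanted; infer_instance

-- ===== CLAIM (what is proved, stated in full; the proofs are below) =====
def Claim_equal_removeunwanted : Prop := ∀ (x : String) (wordlist : List String), Dom_removeunwanted x wordlist → Spec_removeunwanted x wordlist (removeunwanted x wordlist)

-- ===== LEMMAS AND PROOFS =====

-- B's loop, rewritten as structural recursion on the filtered character list,
-- carrying the prefix built so far.
def goB : List Char → List Char → List String → List String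
  | _, [], wl => wl
  | y0, c :: z, wl =>
    goB (y0 ++ [c])
      z
      (if ¬ wl.contains (String.ofList (y0 ++ [c]))
        then wl ++ [String.ofList (y0 ++ [c])] else wl)

theorem foldB_eq_goB : ∀ (z y0 : List Char) (wl : List String),
    (List.range z.length).foldl
      (fun wl j =>
        if ¬ wl.contains (String.ofList (y0 ++ z.take (j + 1)))
          then wl ++ [String.ofList (y0 ++ z.take (j + 1))] else wl)
      wl
    = goB y0 z wl := by
  intro z
  induction z with
  | nil => intro y0 wl; rfl
  | cons c z ih =>
    intro y0 wl
    rw [show (c :: z).length = z.length + 1 from rfl, List.range_succ_eq_map,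
        List.foldl_cons, List.foldl_map]
    have hg : goB y0 (c :: z) wl
        = goB (y0 ++ [c]) z
            (if ¬ wl.contains (String.ofList (y0 ++ [c]))
              then wl ++ [String.ofList (y0 ++ [c])] else wl) := by rw [goB]
    rw [hg, ← ih (y0 ++ [c])]
    simp only [Nat.succ_eq_add_one, List.take_succ_cons, List.take_zero,
      List.append_assoc, List.singleton_append]

theorem push_ofList (l : List Char) (c : Char) :
    (String.ofList l).push c = String.ofList (l ++ [c]) := by
  rw [← String.toList_inj]; simp

-- main invariant: if the accumulator y is empty or already recorded in wl,
-- A's loop equals B's prefix walk over the filtered remainder.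
theorem loopA_eq_goB : ∀ (cs yl : List Char) (wl : List String),
    (yl = [] ∨ wl.contains (String.ofList yl) = true) →
    removeunwantedLoopA cs (String.ofList yl) wl
      = (String.ofList (yl ++ cs.filter (fun c => pvAllowed.contains c)),
         goB yl (cs.filter (fun c => pvAllowed.contains c)) wl) := by
  intro cs
  induction cs with
  | nil =>
    intro yl wl _; simp [removeunwantedLoopA, goB]
  | cons c cs ih =>
    intro yl wl hinv
    rw [removeunwantedLoopA]
    by_cases hc : pvAllowed.contains c
    · -- character kept: y grows, A appends iff absent; invariant holds for new y
      have hfilt : (c :: cs).filter (fun c => pvAllowed.contains c)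
          = c :: cs.filter (fun c => pvAllowed.contains c) := by
        rw [List.filter_cons, if_pos hc]
      have hne : ¬ (String.ofList (yl ++ [c])).length = 0 := by simp
      have hstep : goB yl (c :: cs.filter (fun c => pvAllowed.contains c)) wl
          = goB (yl ++ [c]) (cs.filter (fun c => pvAllowed.contains c))
              (if ¬ wl.contains (String.ofList (yl ++ [c]))
                then wl ++ [String.ofList (yl ++ [c])] else wl) := by rw [goB]
      rw [hfilt, hstep]
      simp only [hc, if_true, push_ofList, hne, ite_not, if_false]
      by_cases hm : wl.contains (String.ofList (yl ++ [c]))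
      · rw [if_pos hm, ih (yl ++ [c]) wl (Or.inr hm)]
        simp [List.append_assoc]
      · rw [if_neg hm,
            ih (yl ++ [c]) (wl ++ [String.ofList (yl ++ [c])])
              (Or.inr (by simp))]
        simp [List.append_assoc]
    · -- character dropped: y unchanged; by the invariant nothing is appended
      have hfilt : (c :: cs).filter (fun c => pvAllowed.contains c)
          = cs.filter (fun c => pvAllowed.contains c) := by
        rw [List.filter_cons, if_neg hc]
      have hwl : (if wl.contains (String.ofList yl) = true then wl
            else if (String.ofList yl).length = 0 then wl else wl ++ [String.ofList yl])
          = wl := by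
        rcases hinv with h | h
        · subst h; simp
        · rw [if_pos h]
      simp only [Bool.not_eq_true] at hc
      simp only [hc, Bool.false_eq_true, if_false, ite_not]
      rw [hwl, hfilt, ih yl wl hinv]

-- ===== VERDICT (by name: the statement is the Claim_ definition above) =====
theorem removeunwanted_spec : Claim_equal_removeunwanted := by
  intro x wl _
  show removeunwanted x wl = removeunwanted_alt x wl
  unfold removeunwanted removeunwanted_alt
  rw [show ("" : String) = String.ofList [] by simp,
      loopA_eq_goB x.toList [] wl (Or.inl rfl)]
  have hfold := foldB_eq_goB (x.toList.filter (fun c => pvAllowed.contains c)) [] wl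
  simp only [List.nil_append] at hfold ⊢
  rw [hfold]
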